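-- pv_equiv track=rewrite | github.com/adrianlerer/integridai-hackai-2025 | integridai-suite/secure-agents/governance/src/anti_scheming_monitor.py | _assess_regulatory_impact
-- ===== SOURCE A (Python) =====
-- from typing import Dict, List, Optional, Tuple, Any, Set
--
-- def _assess_regulatory_impact(action: Dict, pattern_analysis: Dict) -> str:
--     """
--     Evalúa impacto regulatorio potencial
--     """
--     severity_scores = [match.get("severity", "low") for match in pattern_analysis.get("pattern_matches", [])]
--
--     if "critical" in severity_scores:
--         return "Critical regulatory violation risk - immediate escalation required"
--     elif "high" in severity_scores:
--         return "High compliance risk - senior review recommended"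
--     elif "medium" in severity_scores:
--         return "Medium compliance concern - monitoring advised"
--     else:
--         return "Low regulatory impact - standard monitoring"
-- ===== SOURCE B (Python) =====
-- _PRIORITY = {"critical": 3, "high": 2, "medium": 1, "low": 0}
-- _MESSAGES = {
--     3: "Critical regulatory violation risk - immediate escalation required",
--     2: "High compliance risk - senior review recommended",
--     1: "Medium compliance concern - monitoring advised",
--     0: "Low regulatory impact - standard monitoring",
-- }
--
-- def _assess_regulatory_impact(action, pattern_analysis):
--     best = 0
--     for match in pattern_analysis.get("pattern_matches", []):
--         best = max(best, _PRIORITY.get(match.get("severity", "low"), 0))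
--     return _MESSAGES[best]
-- ===== Notes on version B (the rewrite author's own statement) =====
-- stated objective: idiomatic
-- what changed: Replaces the list comprehension plus three sequential membership scans with a single reducing pass that tracks the maximum severity rank via a priority table and returns the message looked up by that rank.
import Mathlib
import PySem

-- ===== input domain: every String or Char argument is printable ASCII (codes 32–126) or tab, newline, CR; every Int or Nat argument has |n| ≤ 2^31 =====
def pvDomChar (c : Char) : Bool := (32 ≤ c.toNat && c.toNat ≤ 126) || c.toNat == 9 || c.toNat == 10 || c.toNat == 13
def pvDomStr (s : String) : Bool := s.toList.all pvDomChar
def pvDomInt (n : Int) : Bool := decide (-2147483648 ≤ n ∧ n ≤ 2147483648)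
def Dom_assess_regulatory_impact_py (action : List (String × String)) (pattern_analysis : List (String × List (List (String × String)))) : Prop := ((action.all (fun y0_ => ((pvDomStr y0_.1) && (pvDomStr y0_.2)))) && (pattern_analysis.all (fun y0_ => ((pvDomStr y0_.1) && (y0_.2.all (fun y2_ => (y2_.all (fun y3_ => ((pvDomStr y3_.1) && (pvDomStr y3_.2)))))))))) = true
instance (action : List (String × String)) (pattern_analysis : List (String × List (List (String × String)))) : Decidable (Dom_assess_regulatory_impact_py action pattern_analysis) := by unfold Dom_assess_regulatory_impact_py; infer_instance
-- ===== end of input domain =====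

-- B replaces A's comprehension plus three membership scans by one reducing pass tracking the
-- maximum severity rank through a priority table; idiomatic, same return value.


-- ===== PORT A =====
def assess_regulatory_impact_py (action : List (String × String)) (pattern_analysis : List (String × List (List (String × String)))) : String :=
  let severity_scores : List String :=
    (PySem.Dict.getD (PySem.Dict.mk pattern_analysis) "pattern_matches" []).map
      (fun m => PySem.Dict.getD (PySem.Dict.mk m) "severity" "low")
  if severity_scores.contains "critical" then
    "Critical regulatory violation risk - immediate escalation required"
  else if severity_scores.contains "high" then
    "High compliance risk - senior review recommended"
  else if severity_scores.contains "medium" then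
    "Medium compliance concern - monitoring advised"
  else
    "Low regulatory impact - standard monitoring"

-- ===== PORT B =====
def pvPriority : PySem.Dict String Int :=
  PySem.Dict.mk [("critical", 3), ("high", 2), ("medium", 1), ("low", 0)]

def pvMessages : PySem.Dict Int String :=
  PySem.Dict.mk
    [ (3, "Critical regulatory violation risk - immediate escalation required")
    , (2, "High compliance risk - senior review recommended")
    , (1, "Medium compliance concern - monitoring advised")
    , (0, "Low regulatory impact - standard monitoring") ]

def assess_regulatory_impact_py_alt (action : List (String × String)) (pattern_analysis : List (String × List (List (String × String)))) : String :=
  let best : Int :=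
    (PySem.Dict.getD (PySem.Dict.mk pattern_analysis) "pattern_matches" []).foldl
      (fun b m => max b (PySem.Dict.getD pvPriority (PySem.Dict.getD (PySem.Dict.mk m) "severity" "low") 0)) 0
  -- _MESSAGES[best]: best is always in {0,1,2,3}, so the lookup never raises; getD "" is exact here
  PySem.Dict.getD pvMessages best ""

-- ===== PRECONDITION & SPEC =====
def Spec_assess_regulatory_impact_py (action : List (String × String)) (pattern_analysis : List (String × List (List (String × String)))) (out : String) : Prop := out = assess_regulatory_impact_py_alt action pattern_analysis
instance (action : List (String × String)) (pattern_analysis : List (String × List (List (String × String)))) (out : String) : Decidable (Spec_assess_regulatory_impact_py action pattern_analysis out) := by unfold Spec_assess_regulatory_impact_py; infer_instance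

-- ===== CLAIM (what is proved, stated in full; the proofs are below) =====
def Claim_equal_assess_regulatory_impact_py : Prop := ∀ (action : List (String × String)) (pattern_analysis : List (String × List (List (String × String)))), Dom_assess_regulatory_impact_py action pattern_analysis → Spec_assess_regulatory_impact_py action pattern_analysis (assess_regulatory_impact_py action pattern_analysis)

-- ===== LEMMAS AND PROOFS =====

-- rank of a severity string, as B's priority table computes it
def pvRank (s : String) : Int := PySem.Dict.getD pvPriority s 0

lemma pvRank_cases (s : String) :
    pvRank s = if s = "critical" then 3 else if s = "high" then 2 else if s = "medium" then 1 else 0 := by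
  unfold pvRank pvPriority
  simp only [PySem.Dict.getD, PySem.Dict.get?, List.find?]
  by_cases h1 : s = "critical"
  · subst h1; simp
  · have e1 : ("critical" == s) = false := beq_eq_false_iff_ne.mpr (fun h => h1 h.symm)
    simp only [e1, if_neg h1]
    by_cases h2 : s = "high"
    · subst h2; simp
    · have e2 : ("high" == s) = false := beq_eq_false_iff_ne.mpr (fun h => h2 h.symm)
      simp only [e2, if_neg h2]
      by_cases h3 : s = "medium"
      · subst h3; simp
      · have e3 : ("medium" == s) = false := beq_eq_false_iff_ne.mpr (fun h => h3 h.symm)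
        simp only [e3, if_neg h3]
        by_cases h4 : s = "low"
        · subst h4; simp
        · have e4 : ("low" == s) = false := beq_eq_false_iff_ne.mpr (fun h => h4 h.symm)
          simp [e4]

lemma pvRank_nonneg (s : String) : 0 ≤ pvRank s := by
  rw [pvRank_cases]; split_ifs <;> omega

lemma pvRank_le_three (s : String) : pvRank s ≤ 3 := by
  rw [pvRank_cases]; split_ifs <;> omega

lemma pvRank_eq_three (s : String) : pvRank s = 3 ↔ s = "critical" := by
  rw [pvRank_cases]; split_ifs <;> simp_all

lemma pvRank_eq_two (s : String) : pvRank s = 2 ↔ s = "high" := by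
  rw [pvRank_cases]; split_ifs <;> simp_all

lemma pvRank_eq_one (s : String) : pvRank s = 1 ↔ s = "medium" := by
  rw [pvRank_cases]; split_ifs <;> simp_all

-- fold with accumulator b = max b (fold from 0)
lemma fold_max_acc (ss : List String) (b : Int) (hb : 0 ≤ b) :
    ss.foldl (fun b s => max b (pvRank s)) b = max b (ss.foldl (fun b s => max b (pvRank s)) 0) := by
  induction ss generalizing b with
  | nil => simp; omega
  | cons s t ih =>
    simp only [List.foldl_cons]
    have h := pvRank_nonneg s
    rw [ih (max b (pvRank s)) (by omega), ih (max 0 (pvRank s)) (by omega)]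
    omega

-- the fold is nonneg and ≤ 3
lemma fold_bounds (ss : List String) :
    0 ≤ ss.foldl (fun b s => max b (pvRank s)) 0 ∧ ss.foldl (fun b s => max b (pvRank s)) 0 ≤ 3 := by
  induction ss with
  | nil => simp
  | cons s t ih =>
    simp only [List.foldl_cons]
    rw [fold_max_acc _ _ (by have := pvRank_nonneg s; omega)]
    have h1 := pvRank_nonneg s
    have h2 := pvRank_le_three s
    omega

-- k ≤ fold ↔ some element has rank ≥ k (for k ≥ 1)
lemma fold_ge_iff (ss : List String) (k : Int) (hk : 1 ≤ k) :
    k ≤ ss.foldl (fun b s => max b (pvRank s)) 0 ↔ ∃ s ∈ ss, k ≤ pvRank s := by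
  induction ss with
  | nil => simp; omega
  | cons s t ih =>
    simp only [List.foldl_cons]
    rw [fold_max_acc _ _ (by have := pvRank_nonneg s; omega)]
    simp only [List.mem_cons]
    constructor
    · intro h
      rcases le_max_iff.mp h with h | h
      · rcases le_max_iff.mp h with h | h
        · omega
        · exact ⟨s, Or.inl rfl, h⟩
      · obtain ⟨x, hx, hxk⟩ := ih.mp h
        exact ⟨x, Or.inr hx, hxk⟩
    · rintro ⟨x, hx | hx, hxk⟩
      · subst hx; have := (fold_bounds t).1; omega
      · have := ih.mpr ⟨x, hx, hxk⟩
        have := pvRank_nonneg s; omega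

lemma mem_iff_rank (ss : List String) :
    ("critical" ∈ ss ↔ ∃ s ∈ ss, 3 ≤ pvRank s)
    ∧ ("high" ∈ ss ↔ ∃ s ∈ ss, pvRank s = 2)
    ∧ ("medium" ∈ ss ↔ ∃ s ∈ ss, pvRank s = 1) := by
  refine ⟨⟨fun h => ⟨_, h, by rw [(pvRank_eq_three _).mpr rfl]⟩, ?_⟩,
          ⟨fun h => ⟨_, h, (pvRank_eq_two _).mpr rfl⟩, ?_⟩,
          ⟨fun h => ⟨_, h, (pvRank_eq_one _).mpr rfl⟩, ?_⟩⟩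
  · rintro ⟨s, hs, h3⟩
    have := pvRank_le_three s
    have : pvRank s = 3 := by omega
    rwa [(pvRank_eq_three s).mp this] at hs
  · rintro ⟨s, hs, h2⟩
    rwa [(pvRank_eq_two s).mp h2] at hs
  · rintro ⟨s, hs, h1⟩
    rwa [(pvRank_eq_one s).mp h1] at hs

-- core: A's chain on a list of severities = B's message of the max rank
lemma chain_eq_msg (ss : List String) :
    (if ss.contains "critical" then
      "Critical regulatory violation risk - immediate escalation required"
    else if ss.contains "high" then
      "High compliance risk - senior review recommended"
    else if ss.contains "medium" then
      "Medium compliance concern - monitoring advised"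
    else
      "Low regulatory impact - standard monitoring")
    = PySem.Dict.getD pvMessages (ss.foldl (fun b s => max b (pvRank s)) 0) "" := by
  obtain ⟨hlo, hhi⟩ := fold_bounds ss
  obtain ⟨hc, hh, hm⟩ := mem_iff_rank ss
  set f := ss.foldl (fun b s => max b (pvRank s)) 0 with hf
  by_cases h3 : "critical" ∈ ss
  · have : 3 ≤ f := (fold_ge_iff ss 3 (by norm_num)).mpr (hc.mp h3)
    have hf3 : f = 3 := by omega
    simp [h3, hf3, pvMessages, PySem.Dict.getD, PySem.Dict.get?]
  · by_cases h2 : "high" ∈ ss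
    · have hge : 2 ≤ f := (fold_ge_iff ss 2 (by norm_num)).mpr
        (by obtain ⟨s, hs, he⟩ := hh.mp h2; exact ⟨s, hs, by omega⟩)
      have hne : f ≠ 3 := by
        intro he
        exact h3 (hc.mpr ((fold_ge_iff ss 3 (by norm_num)).mp (by omega)))
      have hf2 : f = 2 := by omega
      simp [h3, h2, hf2, pvMessages, PySem.Dict.getD, PySem.Dict.get?]
    · by_cases h1 : "medium" ∈ ss
      · have hge : 1 ≤ f := (fold_ge_iff ss 1 (by norm_num)).mpr
          (by obtain ⟨s, hs, he⟩ := hm.mp h1; exact ⟨s, hs, by omega⟩)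
        have hn3 : f ≠ 3 := fun he => h3 (hc.mpr ((fold_ge_iff ss 3 (by norm_num)).mp (by omega)))
        have hn2 : f ≠ 2 := by
          intro he
          obtain ⟨s, hs, hsk⟩ := (fold_ge_iff ss 2 (by norm_num)).mp (by omega)
          have hlt : pvRank s ≤ 3 := pvRank_le_three s
          rcases (by omega : pvRank s = 2 ∨ pvRank s = 3) with h | h
          · exact h2 (hh.mpr ⟨s, hs, h⟩)
          · exact h3 (hc.mpr ⟨s, hs, by omega⟩)
        have hf1 : f = 1 := by omega
        simp [h3, h2, h1, hf1, pvMessages, PySem.Dict.getD, PySem.Dict.get?]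
      · have hn : ¬ 1 ≤ f := by
          intro hge
          obtain ⟨s, hs, hsk⟩ := (fold_ge_iff ss 1 (by norm_num)).mp hge
          have := pvRank_le_three s
          rcases (by omega : pvRank s = 1 ∨ pvRank s = 2 ∨ pvRank s = 3) with h | h | h
          · exact h1 (hm.mpr ⟨s, hs, h⟩)
          · exact h2 (hh.mpr ⟨s, hs, h⟩)
          · exact h3 (hc.mpr ⟨s, hs, by omega⟩)
        have hf0 : f = 0 := by omega
        simp [h3, h2, h1, hf0, pvMessages, PySem.Dict.getD, PySem.Dict.get?]

lemma fold_map (ms : List (List (String × String))) :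
    (ms.map (fun m => PySem.Dict.getD (PySem.Dict.mk m) "severity" "low")).foldl
        (fun b s => max b (pvRank s)) 0
      = ms.foldl (fun b m => max b (PySem.Dict.getD pvPriority (PySem.Dict.getD (PySem.Dict.mk m) "severity" "low") 0)) 0 := by
  rw [List.foldl_map]
  rfl

-- ===== VERDICT (by name: the statement is the Claim_ definition above) =====
theorem assess_regulatory_impact_py_spec : Claim_equal_assess_regulatory_impact_py := by
  intro action pattern_analysis _
  unfold Spec_assess_regulatory_impact_py assess_regulatory_impact_py assess_regulatory_impact_py_alt
  rw [← fold_map]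
  exact chain_eq_msg _
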